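-- pv_equiv track=rewrite | github.com/ssarangi/algorithms | epi/arrays/sudoku.py | valid_subboard
-- ===== SOURCE A (Python) =====
-- def valid_subboard(board, i, j, size_x, size_y):
--     seen = 0
--     for row in range(i, i + size_y):
--         for col in range(j, j + size_x):
--             if board[row][col] is None:
--                 continue
--
--             if seen & (1 << board[row][col]):
--                 return False
--             else:
--                 seen |= (1 << board[row][col])
--
--     return True
-- ===== SOURCE B (Python) =====
-- def valid_subboard(board, i, j, size_x, size_y):
--     values = [board[row][col]
--               for row in range(i, i + size_y)
--               for col in range(j, j + size_x)
--               if board[row][col] is not None]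
--     return len(values) == len(set(values))
-- ===== Notes on version B (the rewrite author's own statement) =====
-- stated objective: simpler
-- what changed: Replaces the incremental bitmask with early return by a gather-then-compare pass: one comprehension collects all non-None cell values of the region, then a single len(values)==len(set(values)) cardinality test decides duplicates.
-- outside the precondition, e.g. on valid_subboard([[1, 1]], 0, 0, 3, 1): A returns False, B raises IndexError; on valid_subboard([[1, 1, -5]], 0, 0, 3, 1): A returns False, B returns False
import Mathlib
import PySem

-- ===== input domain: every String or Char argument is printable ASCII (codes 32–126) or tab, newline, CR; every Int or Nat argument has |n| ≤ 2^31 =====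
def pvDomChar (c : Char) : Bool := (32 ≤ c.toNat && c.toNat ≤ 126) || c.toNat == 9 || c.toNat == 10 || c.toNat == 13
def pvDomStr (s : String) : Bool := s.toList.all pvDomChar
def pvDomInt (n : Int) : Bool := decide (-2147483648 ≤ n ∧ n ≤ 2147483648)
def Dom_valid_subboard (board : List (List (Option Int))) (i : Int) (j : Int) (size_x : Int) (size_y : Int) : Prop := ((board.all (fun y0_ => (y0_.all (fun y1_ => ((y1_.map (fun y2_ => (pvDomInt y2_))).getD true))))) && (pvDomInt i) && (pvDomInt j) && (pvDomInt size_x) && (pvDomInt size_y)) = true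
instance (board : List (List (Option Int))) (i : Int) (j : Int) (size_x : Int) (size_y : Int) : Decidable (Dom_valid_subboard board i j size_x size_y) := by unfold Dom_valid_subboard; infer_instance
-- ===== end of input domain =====

-- B replaces A's incremental bitmask-with-early-return by a gather-then-compare pass:
-- collect all non-None values of the region, then compare len(values) with len(set(values)). Objective: simpler.

-- ===== PORT A =====
-- the early 'return False' is modelled by an Option Nat state: none = already returned False
def valid_subboard (board : List (List (Option Int))) (i : Int) (j : Int) (size_x : Int) (size_y : Int) : Bool :=
  ((PySem.List.pyRange i (i + size_y) 1).foldl (fun st row =>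
      (PySem.List.pyRange j (j + size_x) 1).foldl (fun st col =>
        st.bind (fun seen =>
          match PySem.List.pyGet? board row with
          | none => some seen        -- IndexError in Python; excluded by Pre_
          | some r =>
            match PySem.List.pyGet? r col with
            | none => some seen      -- IndexError in Python; excluded by Pre_
            | some none => some seen -- board[row][col] is None: continue
            | some (some v) =>
              if seen &&& (1 <<< v.toNat) != 0 then none
              else some (seen ||| (1 <<< v.toNat)))) st)
    (some (0 : Nat))).isSome

-- ===== PORT B =====
-- the comprehension: all non-None values of the region, in scan order
def vsVals (board : List (List (Option Int))) (i : Int) (j : Int) (size_x : Int) (size_y : Int) : List Int :=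
  (PySem.List.pyRange i (i + size_y) 1).flatMap (fun row =>
    (PySem.List.pyRange j (j + size_x) 1).filterMap (fun col =>
      (PySem.List.pyGet? board row).bind (fun r => (PySem.List.pyGet? r col).bind id)))

def valid_subboard_alt (board : List (List (Option Int))) (i : Int) (j : Int) (size_x : Int) (size_y : Int) : Bool :=
  let values := vsVals board i j size_x size_y
  values.length == (PySem.Set.ofList values).length

-- ===== PRECONDITION & SPEC =====
-- a region cell is admissible when it exists (Python indexing succeeds) and, when non-None, is nonnegative
def vsCellOk (board : List (List (Option Int))) (row col : Int) : Bool :=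
  match (PySem.List.pyGet? board row).bind (fun r => PySem.List.pyGet? r col) with
  | none => false
  | some none => true
  | some (some v) => decide (0 ≤ v)

-- bounds-first check that the whole region lies inside the board with nonnegative cells
def vsPre (board : List (List (Option Int))) (i : Int) (j : Int) (size_x : Int) (size_y : Int) : Bool :=
  if size_y ≤ 0 ∨ size_x ≤ 0 then true
  else if -(board.length : Int) ≤ i ∧ i + size_y ≤ (board.length : Int) then
    (PySem.List.pyRange i (i + size_y) 1).all (fun row =>
        match PySem.List.pyGet? board row with
        | none => false
        | some r =>
          if -(r.length : Int) ≤ j ∧ j + size_x ≤ (r.length : Int) then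
            (PySem.List.pyRange j (j + size_x) 1).all (fun col => vsCellOk board row col)
          else false)
  else false

-- Pre_ excludes nonempty regions whose row indices fall outside the board, and region cells with an
-- out-of-range column index or a negative value: Python raises IndexError/ValueError there unless A's
-- early duplicate exit (or an empty column range) happens to return first.
def Pre_valid_subboard (board : List (List (Option Int))) (i : Int) (j : Int) (size_x : Int) (size_y : Int) : Prop :=
  vsPre board i j size_x size_y = true
instance (board : List (List (Option Int))) (i : Int) (j : Int) (size_x : Int) (size_y : Int) : Decidable (Pre_valid_subboard board i j size_x size_y) := by unfold Pre_valid_subboard; infer_instance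

def pvWitness_valid_subboard : List (List (Option Int)) × Int × Int × Int × Int :=
  ([[some 0, some 1], [some 2, none]], 0, 0, 2, 2)

def Spec_valid_subboard (board : List (List (Option Int))) (i : Int) (j : Int) (size_x : Int) (size_y : Int) (out : Bool) : Prop := out = valid_subboard_alt board i j size_x size_y
instance (board : List (List (Option Int))) (i : Int) (j : Int) (size_x : Int) (size_y : Int) (out : Bool) : Decidable (Spec_valid_subboard board i j size_x size_y out) := by unfold Spec_valid_subboard; infer_instance

-- ===== CLAIM (what is proved, stated in full; the proofs are below) =====
def Claim_equal_valid_subboard : Prop := ∀ (board : List (List (Option Int))) (i : Int) (j : Int) (size_x : Int) (size_y : Int), Dom_valid_subboard board i j size_x size_y → Pre_valid_subboard board i j size_x size_y → Spec_valid_subboard board i j size_x size_y (valid_subboard board i j size_x size_y)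

-- ===== LEMMAS AND PROOFS =====

-- the per-value step of A's loop, on the flattened value list
def vsMaskStep (st : Option Nat) (v : Int) : Option Nat :=
  st.bind (fun seen =>
    if seen &&& (1 <<< v.toNat) != 0 then none
    else some (seen ||| (1 <<< v.toNat)))

theorem bne_and_two_pow (m k : Nat) : (m &&& (1 <<< k) != 0) = m.testBit k := by
  rw [Nat.one_shiftLeft, Nat.and_two_pow]
  cases h : m.testBit k
  · simp
  · simpa using (Nat.two_pow_pos k).ne' 

theorem foldl_vsMaskStep_none (vals : List Int) : vals.foldl vsMaskStep none = none := by
  induction vals with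
  | nil => rfl
  | cons v t ih => simpa [vsMaskStep] using ih

-- A's fold succeeds iff the values are pairwise distinct and disjoint from the already-seen set S
theorem foldl_vsMaskStep_isSome (vals : List Int) :
    ∀ (m : Nat) (S : List Int), (∀ v ∈ vals, 0 ≤ v) →
    (∀ k : Nat, m.testBit k = true ↔ (k : Int) ∈ S) →
    ((vals.foldl vsMaskStep (some m)).isSome = true ↔ (vals.Nodup ∧ ∀ v ∈ vals, v ∉ S)) := by
  induction vals with
  | nil => intro m S _ _; simp
  | cons v t ih =>
    intro m S hnn hm
    have hv : 0 ≤ v := hnn v (by simp)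
    simp only [List.foldl_cons, vsMaskStep, Option.bind_some, bne_and_two_pow]
    by_cases hbit : m.testBit v.toNat = true
    · have hvS : v ∈ S := by
        have := (hm v.toNat).mp hbit
        rwa [Int.toNat_of_nonneg hv] at this
      rw [hbit]
      simp only [if_true, foldl_vsMaskStep_none]
      simp only [Option.isSome_none, Bool.false_eq_true, false_iff]
      intro ⟨_, hall⟩
      exact hall v (by simp) hvS
    · have hvS : v ∉ S := by
        intro hin
        exact hbit ((hm v.toNat).mpr (by rwa [Int.toNat_of_nonneg hv]))
      rw [Bool.not_eq_true] at hbit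
      rw [hbit]
      simp only [Bool.false_eq_true, if_false]
      rw [ih (m ||| (1 <<< v.toNat)) (v :: S) (fun x hx => hnn x (by simp [hx]))
        (by
          intro k
          simp only [Nat.testBit_or, Nat.one_shiftLeft, Nat.testBit_two_pow, Bool.or_eq_true,
            List.mem_cons, hm k, decide_eq_true_eq]
          constructor
          · rintro (h | h)
            · exact Or.inr h
            · exact Or.inl (by omega)
          · rintro (h | h)
            · exact Or.inr (by omega)
            · exact Or.inl h)]
      constructor
      · rintro ⟨hnd, hall⟩
        refine ⟨List.nodup_cons.mpr ⟨fun hin => hall _ hin (by simp), hnd⟩, ?_⟩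
        intro x hx
        rcases List.mem_cons.mp hx with rfl | hxt
        · exact hvS
        · exact fun hxS => hall x hxt (List.mem_cons_of_mem _ hxS)
      · rintro ⟨hnd, hall⟩
        refine ⟨(List.nodup_cons.mp hnd).2, ?_⟩
        intro x hx hxvS
        rcases List.mem_cons.mp hxvS with rfl | hxS
        · exact (List.nodup_cons.mp hnd).1 hx
        · exact hall x (List.mem_cons_of_mem _ hx) hxS

-- B's set construction: length reaches s.length + l.length exactly when l is duplicate-free and disjoint from s
theorem length_setOfList_foldl (l : List Int) :
    ∀ s : PySem.Set Int, ((l.foldl PySem.Set.add s).length = s.length + l.length ↔ (l.Nodup ∧ ∀ x ∈ l, x ∉ s)) ∧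
      (l.foldl PySem.Set.add s).length ≤ s.length + l.length := by
  induction l with
  | nil => intro s; simp
  | cons v t ih =>
    intro s
    simp only [List.foldl_cons, List.length_cons, List.nodup_cons, List.forall_mem_cons]
    by_cases hv : v ∈ s
    · rw [PySem.Set.add_of_mem hv]
      have hle := (ih s).2
      refine ⟨⟨fun h => absurd h (by omega), fun ⟨_, h, _⟩ => absurd hv h⟩, by omega⟩
    · rw [PySem.Set.add_of_not_mem hv]
      have key := (ih (s ++ [v])).1
      have hlen : (s ++ [v]).length = s.length + 1 := by simp
      have hle := (ih (s ++ [v])).2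
      refine ⟨⟨?_, ?_⟩, by omega⟩
      · intro h
        obtain ⟨hnd, hall⟩ := key.mp (by omega)
        refine ⟨⟨fun hvt => ?_, hnd⟩, hv, fun x hx => ?_⟩
        · exact absurd (hall v hvt) (by simp)
        · intro hxs
          exact hall x hx (by simp [hxs])
      · rintro ⟨⟨hvt, hnd⟩, _, hall⟩
        have h2 := key.mpr ⟨hnd, fun x hx => by
          simp only [List.mem_append, List.mem_singleton, not_or]
          exact ⟨hall x hx, fun hxv => hvt (hxv ▸ hx)⟩⟩
        omega

theorem length_ofList_eq_iff (l : List Int) :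
    ((PySem.Set.ofList l).length = l.length) ↔ l.Nodup := by
  have h := (length_setOfList_foldl l []).1
  rw [PySem.Set.ofList_eq_foldl]
  simpa using h

-- inner loop of A over the columns = single fold over the row's non-None values
theorem vs_inner_fold (board : List (List (Option Int))) (row : Int) (cols : List Int)
    (h : ∀ col ∈ cols, vsCellOk board row col = true) :
    ∀ st : Option Nat,
      cols.foldl (fun st col => st.bind (fun seen =>
          match PySem.List.pyGet? board row with
          | none => some seen
          | some r =>
            match PySem.List.pyGet? r col with
            | none => some seen
            | some none => some seen
            | some (some v) =>
              if seen &&& (1 <<< v.toNat) != 0 then none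
              else some (seen ||| (1 <<< v.toNat)))) st
      = (cols.filterMap (fun col =>
          (PySem.List.pyGet? board row).bind (fun r => (PySem.List.pyGet? r col).bind id))).foldl vsMaskStep st := by
  induction cols with
  | nil => intro st; rfl
  | cons c cs ih =>
    intro st
    have hc := h c (by simp)
    unfold vsCellOk at hc
    simp only [List.foldl_cons, List.filterMap_cons]
    have hassoc : ((PySem.List.pyGet? board row).bind (fun r => (PySem.List.pyGet? r c).bind id))
        = ((PySem.List.pyGet? board row).bind (fun r => PySem.List.pyGet? r c)).bind id := by
      cases PySem.List.pyGet? board row <;> rfl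
    cases he : (PySem.List.pyGet? board row).bind (fun r => PySem.List.pyGet? r c) with
    | none => rw [he] at hc; simp at hc
    | some cell =>
      rw [he] at hc
      cases cell with
      | none =>
        have hstep : ∀ s : Option Nat, (s.bind (fun seen =>
            match PySem.List.pyGet? board row with
            | none => some seen
            | some r =>
              match PySem.List.pyGet? r c with
              | none => some seen
              | some none => some seen
              | some (some v) =>
                if seen &&& (1 <<< v.toNat) != 0 then none
                else some (seen ||| (1 <<< v.toNat)))) = s := by
          intro s
          cases hb : PySem.List.pyGet? board row with
          | none => rw [hb] at he; simp at he
          | some r =>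
            rw [hb] at he
            simp only [Option.bind_some] at he
            cases s <;> simp [he]
        rw [hstep st, hassoc, he]
        simp only [Option.bind_some, id_eq]
        exact ih (fun col hcol => h col (by simp [hcol])) st
      | some v =>
        have hstep : ∀ s : Option Nat, (s.bind (fun seen =>
            match PySem.List.pyGet? board row with
            | none => some seen
            | some r =>
              match PySem.List.pyGet? r c with
              | none => some seen
              | some none => some seen
              | some (some v) =>
                if seen &&& (1 <<< v.toNat) != 0 then none
                else some (seen ||| (1 <<< v.toNat)))) = vsMaskStep s v := by
          intro s
          cases hb : PySem.List.pyGet? board row with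
          | none => rw [hb] at he; simp at he
          | some r =>
            rw [hb] at he
            simp only [Option.bind_some] at he
            cases s <;> simp [he, vsMaskStep]
        rw [hstep st, hassoc, he]
        simp only [Option.bind_some, id_eq, List.foldl_cons]
        exact ih (fun col hcol => h col (by simp [hcol])) (vsMaskStep st v)

-- outer loop of A over the rows = single fold over the flattened value list
theorem vs_outer_fold (board : List (List (Option Int))) (cols : List Int) (rows : List Int)
    (h : ∀ row ∈ rows, ∀ col ∈ cols, vsCellOk board row col = true) :
    ∀ st : Option Nat,
      rows.foldl (fun st row =>
        cols.foldl (fun st col => st.bind (fun seen =>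
          match PySem.List.pyGet? board row with
          | none => some seen
          | some r =>
            match PySem.List.pyGet? r col with
            | none => some seen
            | some none => some seen
            | some (some v) =>
              if seen &&& (1 <<< v.toNat) != 0 then none
              else some (seen ||| (1 <<< v.toNat)))) st) st
      = (rows.flatMap (fun row => cols.filterMap (fun col =>
          (PySem.List.pyGet? board row).bind (fun r => (PySem.List.pyGet? r col).bind id)))).foldl vsMaskStep st := by
  induction rows with
  | nil => intro st; rfl
  | cons rw0 rs ih =>
    intro st
    simp only [List.foldl_cons, List.flatMap_cons, List.foldl_append]
    rw [vs_inner_fold board rw0 cols (h rw0 (by simp)) st]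
    exact ih (fun row hrow => h row (by simp [hrow])) _

-- the bounds-first Pre_ gives the pointwise admissibility of every visited cell
theorem pre_pointwise (board : List (List (Option Int))) (i j size_x size_y : Int)
    (h : Pre_valid_subboard board i j size_x size_y) :
    ∀ row ∈ PySem.List.pyRange i (i + size_y) 1, ∀ col ∈ PySem.List.pyRange j (j + size_x) 1,
      vsCellOk board row col = true := by
  intro row hrow col hcol
  have hr := PySem.List.mem_pyRange_one.mp hrow
  have hc := PySem.List.mem_pyRange_one.mp hcol
  unfold Pre_valid_subboard vsPre at h
  rw [if_neg (by omega)] at h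
  split at h
  · have hall := List.all_eq_true.mp h row hrow
    cases hb : PySem.List.pyGet? board row with
    | none => rw [hb] at hall; simp at hall
    | some r =>
      rw [hb] at hall
      split at hall <;> simp at hall <;>
        first
          | exact hall.2 col hc.1 hc.2
          | exact hall col hc.1 hc.2
  · simp at h

theorem valid_subboard_eq_fold (board : List (List (Option Int))) (i j size_x size_y : Int)
    (hpre : ∀ row ∈ PySem.List.pyRange i (i + size_y) 1, ∀ col ∈ PySem.List.pyRange j (j + size_x) 1,
      vsCellOk board row col = true) :
    valid_subboard board i j size_x size_y
      = ((vsVals board i j size_x size_y).foldl vsMaskStep (some 0)).isSome := by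
  unfold valid_subboard vsVals
  rw [vs_outer_fold board (PySem.List.pyRange j (j + size_x) 1) (PySem.List.pyRange i (i + size_y) 1) hpre (some 0)]

theorem vsVals_nonneg (board : List (List (Option Int))) (i j size_x size_y : Int)
    (hpre : ∀ row ∈ PySem.List.pyRange i (i + size_y) 1, ∀ col ∈ PySem.List.pyRange j (j + size_x) 1,
      vsCellOk board row col = true) :
    ∀ v ∈ vsVals board i j size_x size_y, 0 ≤ v := by
  intro v hv
  simp only [vsVals, List.mem_flatMap, List.mem_filterMap] at hv
  obtain ⟨row, hrow, col, hcol, hcell⟩ := hv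
  have hok := hpre row hrow col hcol
  unfold vsCellOk at hok
  cases h1 : PySem.List.pyGet? board row with
  | none => rw [h1] at hcell; simp at hcell
  | some r =>
    rw [h1] at hok hcell
    simp only [Option.bind_some] at hok hcell
    cases h2 : PySem.List.pyGet? r col with
    | none => rw [h2] at hcell; simp at hcell
    | some c =>
      rw [h2] at hok hcell
      cases c with
      | none => simp at hcell
      | some w =>
        simp only [Option.bind_some, id] at hcell
        rw [hcell] at hok
        simpa using hok

-- ===== VERDICT (by name: the statement is the Claim_ definition above) =====
theorem valid_subboard_spec : Claim_equal_valid_subboard := by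
  intro board i j size_x size_y _ hpre
  have hpw := pre_pointwise board i j size_x size_y hpre
  unfold Spec_valid_subboard
  rw [valid_subboard_eq_fold board i j size_x size_y hpw]
  unfold valid_subboard_alt
  rw [Bool.eq_iff_iff]
  rw [foldl_vsMaskStep_isSome _ 0 [] (vsVals_nonneg board i j size_x size_y hpw) (by simp)]
  simp only [beq_iff_eq, List.not_mem_nil, not_false_iff, implies_true, and_true]
  rw [eq_comm, length_ofList_eq_iff]
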